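-- pv_equiv track=rewrite | github.com/OpenFactoryTwin/ofact | ofact/twin/repository_services/deserialization/old_basic_file_loader.py | convert_tuple_keys_to_nested_dict
-- ===== SOURCE A (Python) =====
-- from collections import defaultdict
-- from typing import Optional, List
--
-- def convert_tuple_keys_to_nested_dict(dict_, allowed_key_names: Optional[List[str]] = None):
--     """Used for the mapping of objects to entity_type"""
--     dict_keys = list(set(dict_.keys()))
--
--     mapping_dict = defaultdict(list)
--     if allowed_key_names is not None:
--         for (key1, key2), val in dict_.items():
--             if key1 in allowed_key_names:
--                 mapping_dict[key1].append((key2, val))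
--     else:
--         for (key1, key2), val in dict_.items():
--             mapping_dict[key1].append((key2, val))
--
--     nested_dict = {key_class: dict(mapping_dict[key_class])
--                    for key_class, _ in dict_keys
--                    if key_class in mapping_dict}
--
--     return nested_dict
-- ===== SOURCE B (Python) =====
-- def convert_tuple_keys_to_nested_dict(dict_, allowed_key_names=None):
--     """Used for the mapping of objects to entity_type"""
--     nested_dict = {}
--     for (key1, key2), val in dict_.items():
--         if allowed_key_names is not None and key1 not in allowed_key_names:
--             continue
--         nested_dict.setdefault(key1, {})[key2] = val
--     return nested_dict
-- ===== Notes on version B (the rewrite author's own statement) =====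
-- stated objective: simpler
-- what changed: B builds the nested dict directly in one pass with setdefault, dropping A's deduplicated key list, intermediate defaultdict-of-lists and the second comprehension pass.
import Mathlib
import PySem

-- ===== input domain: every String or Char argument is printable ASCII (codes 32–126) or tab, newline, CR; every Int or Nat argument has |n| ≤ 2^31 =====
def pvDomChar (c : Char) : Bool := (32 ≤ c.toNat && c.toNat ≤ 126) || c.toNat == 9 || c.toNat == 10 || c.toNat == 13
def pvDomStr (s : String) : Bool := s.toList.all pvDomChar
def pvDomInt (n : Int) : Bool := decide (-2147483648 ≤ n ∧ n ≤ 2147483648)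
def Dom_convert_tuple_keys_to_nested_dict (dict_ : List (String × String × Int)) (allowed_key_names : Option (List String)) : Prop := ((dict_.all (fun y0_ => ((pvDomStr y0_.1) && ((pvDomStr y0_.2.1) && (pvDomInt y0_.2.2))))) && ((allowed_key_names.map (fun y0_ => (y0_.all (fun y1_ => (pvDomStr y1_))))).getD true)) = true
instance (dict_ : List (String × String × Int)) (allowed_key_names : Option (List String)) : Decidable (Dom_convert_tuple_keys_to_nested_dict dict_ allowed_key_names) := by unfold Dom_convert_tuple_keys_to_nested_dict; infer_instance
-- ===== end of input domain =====

-- B replaces A's three-stage build (dedup key list, defaultdict-of-lists, second comprehension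
-- pass) by one direct setdefault pass; equivalence is stated for Python's dict == semantics:
-- Python iterates a set (hash order) for the outer keys, which the ports model as
-- first-occurrence order (top-level dict outputs are compared ignoring key order).

-- ===== PORT A =====
def convert_tuple_keys_to_nested_dict (dict_ : List (String × String × Int)) (allowed_key_names : Option (List String)) : List (String × List (String × Int)) :=
  -- dict_keys = list(set(dict_.keys())) — set iteration order modelled as first-occurrence order
  let dict_keys : List (String × String) := PySem.Set.ofList (dict_.map (fun p => (p.1, p.2.1)))
  -- mapping_dict = defaultdict(list); the two for-loops
  let mapping_dict : PySem.Dict String (List (String × Int)) :=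
    match allowed_key_names with
    | some allowed =>
        dict_.foldl (fun m p => if allowed.contains p.1 then m.modify p.1 [] (fun l => l ++ [p.2]) else m) PySem.Dict.empty
    | none =>
        dict_.foldl (fun m p => m.modify p.1 [] (fun l => l ++ [p.2])) PySem.Dict.empty
  -- nested_dict = {key_class: dict(mapping_dict[key_class]) for key_class, _ in dict_keys if key_class in mapping_dict}
  let nested_dict : PySem.Dict String (List (String × Int)) :=
    dict_keys.foldl (fun nd kc =>
      if mapping_dict.contains kc.1 then nd.insert kc.1 (PySem.Dict.ofList (mapping_dict.getD kc.1 [])).items else nd)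
      PySem.Dict.empty
  nested_dict.items

-- ===== PORT B =====
def convert_tuple_keys_to_nested_dict_alt (dict_ : List (String × String × Int)) (allowed_key_names : Option (List String)) : List (String × List (String × Int)) :=
  let nested_dict : PySem.Dict String (PySem.Dict String Int) :=
    dict_.foldl (fun nd p =>
      -- if allowed_key_names is not None and key1 not in allowed_key_names: continue
      if (match allowed_key_names with | some names => !names.contains p.1 | none => false) then nd
      -- nested_dict.setdefault(key1, {})[key2] = val
      else nd.modify p.1 PySem.Dict.empty (fun inner => inner.insert p.2.1 p.2.2))
      PySem.Dict.empty
  nested_dict.items.map (fun q => (q.1, q.2.items))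

-- ===== PRECONDITION & SPEC =====
def Spec_convert_tuple_keys_to_nested_dict (dict_ : List (String × String × Int)) (allowed_key_names : Option (List String)) (out : List (String × List (String × Int))) : Prop := out = convert_tuple_keys_to_nested_dict_alt dict_ allowed_key_names
instance (dict_ : List (String × String × Int)) (allowed_key_names : Option (List String)) (out : List (String × List (String × Int))) : Decidable (Spec_convert_tuple_keys_to_nested_dict dict_ allowed_key_names out) := by unfold Spec_convert_tuple_keys_to_nested_dict; infer_instance

-- ===== CLAIM (what is proved, stated in full; the proofs are below) =====
def Claim_equal_convert_tuple_keys_to_nested_dict : Prop := ∀ (dict_ : List (String × String × Int)) (allowed_key_names : Option (List String)), Dom_convert_tuple_keys_to_nested_dict dict_ allowed_key_names → Spec_convert_tuple_keys_to_nested_dict dict_ allowed_key_names (convert_tuple_keys_to_nested_dict dict_ allowed_key_names)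

-- ===== LEMMAS AND PROOFS =====

-- the filtering predicate both programs apply to a first-component key
def pvCond (allowed_key_names : Option (List String)) (k : String) : Bool :=
  match allowed_key_names with | some names => names.contains k | none => true

-- a guarded foldl is the foldl over the filtered list
theorem pv_foldl_filter {α β : Type} (q : α → Bool) (f : β → α → β) :
    ∀ (xs : List α) (init : β),
      xs.foldl (fun a x => if q x then f a x else a) init = (xs.filter q).foldl f init := by
  intro xs
  induction xs with
  | nil => intro init; rfl
  | cons x t ih =>
    intro init
    by_cases h : q x = true
    · simp [h, ih]
    · simp only [Bool.not_eq_true] at h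
      simp [h, ih]

-- appending one element to a dedup
theorem pv_ofList_append {α : Type} [BEq α] [LawfulBEq α] (u : List α) (x : α) :
    PySem.Set.ofList (u ++ [x])
    = if x ∈ PySem.Set.ofList u then PySem.Set.ofList u else PySem.Set.ofList u ++ [x] := by
  simp only [PySem.Set.ofList, List.foldl_append, List.foldl_cons, List.foldl_nil]
  unfold PySem.Set.add
  by_cases hm : x ∈ List.foldl PySem.Set.add PySem.Set.empty u
  · simp
  · simp


-- a negatively guarded ('continue') foldl is the foldl over the filtered list
theorem pv_foldl_filter_neg {α β : Type} (q : α → Bool) (f : β → α → β) :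
    ∀ (xs : List α) (init : β),
      xs.foldl (fun a x => if !q x then a else f a x) init = (xs.filter q).foldl f init := by
  intro xs
  induction xs with
  | nil => intro init; rfl
  | cons x t ih =>
    intro init
    by_cases h : q x = true
    · have h1 : (if (!q x) = true then init else f init x) = f init x := by simp [h]
      rw [List.foldl_cons, h1, ih, List.filter_cons, h, if_pos rfl, List.foldl_cons]
    · simp only [Bool.not_eq_true] at h
      have h1 : (if (!q x) = true then init else f init x) = init := by simp [h]
      rw [List.foldl_cons, h1, ih, List.filter_cons, h]
      simp

-- first-occurrence dedup commutes with filter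
theorem pv_ofList_filter {α : Type} [BEq α] [LawfulBEq α] (q : α → Bool) :
    ∀ (xs : List α), PySem.Set.ofList (xs.filter q) = (PySem.Set.ofList xs).filter q := by
  intro xs
  induction xs using List.reverseRecOn with
  | nil => rfl
  | append_singleton t x ih =>
    rw [List.filter_append, pv_ofList_append t x]
    by_cases hq : q x = true
    · simp only [List.filter_cons, hq, if_true, List.filter_nil]
      rw [pv_ofList_append (t.filter q) x, ih]
      by_cases hm : x ∈ PySem.Set.ofList t
      · have hm' : x ∈ (PySem.Set.ofList t).filter q := List.mem_filter.mpr ⟨hm, hq⟩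
        simp [hm, hm']
      · have hm' : x ∉ (PySem.Set.ofList t).filter q := fun hc => hm (List.mem_filter.mp hc).1
        simp [hm, hm', List.filter_append, hq]
    · simp only [Bool.not_eq_true] at hq
      simp only [List.filter_cons, hq, Bool.false_eq_true, if_false, List.filter_nil,
        List.append_nil, ih]
      by_cases hm : x ∈ PySem.Set.ofList t
      · simp [hm]
      · simp [hm, List.filter_append, hq]

-- dedup of a map of a dedup is dedup of the map
theorem pv_ofList_map_ofList {α β : Type} [BEq α] [LawfulBEq α] [BEq β] [LawfulBEq β] (f : α → β) :
    ∀ (t : List α), PySem.Set.ofList ((PySem.Set.ofList t).map f) = PySem.Set.ofList (t.map f) := by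
  intro t
  induction t using List.reverseRecOn with
  | nil => rfl
  | append_singleton u a ih =>
    rw [List.map_append, List.map_singleton, pv_ofList_append u a, pv_ofList_append (u.map f) (f a)]
    by_cases hm : a ∈ PySem.Set.ofList u
    · have hfb : f a ∈ PySem.Set.ofList (u.map f) := by
        rw [PySem.Set.mem_ofList] at hm ⊢
        exact List.mem_map_of_mem hm
      simp [hm, hfb, ih]
    · have hmem_iff : f a ∈ PySem.Set.ofList ((PySem.Set.ofList u).map f) ↔ f a ∈ PySem.Set.ofList (u.map f) := by
        rw [PySem.Set.mem_ofList, PySem.Set.mem_ofList]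
        constructor
        · intro hc
          rcases List.mem_map.mp hc with ⟨b, hb, hfb'⟩
          exact List.mem_map.mpr ⟨b, (PySem.Set.mem_ofList u b).mp hb, hfb'⟩
        · intro hc
          rcases List.mem_map.mp hc with ⟨b, hb, hfb'⟩
          exact List.mem_map.mpr ⟨b, (PySem.Set.mem_ofList u b).mpr hb, hfb'⟩
      by_cases hfb : f a ∈ PySem.Set.ofList (u.map f)
      · have h2 := hmem_iff.mpr hfb
        simp only [hm, if_false, List.map_append, List.map_singleton]
        rw [pv_ofList_append ((PySem.Set.ofList u).map f) (f a)]
        simp [hfb, ih]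
      · have h2 : f a ∉ PySem.Set.ofList ((PySem.Set.ofList u).map f) := fun hc => hfb (hmem_iff.mp hc)
        simp only [hm, if_false, List.map_append, List.map_singleton]
        rw [pv_ofList_append ((PySem.Set.ofList u).map f) (f a)]
        simp [hfb, ih]

-- A's final loop: conditional inserts of key-determined values over a key list
theorem pv_insert_loop_items (c : String → Bool) (V : String → List (String × Int)) :
    ∀ (ks : List String),
      (ks.foldl (fun nd k => if c k then nd.insert k (V k) else nd)
        (PySem.Dict.empty : PySem.Dict String (List (String × Int)))).items
      = (PySem.Set.ofList (ks.filter c)).map (fun k => (k, V k)) := by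
  intro ks
  induction ks using List.reverseRecOn with
  | nil => rfl
  | append_singleton t x ih =>
    rw [List.foldl_append, List.foldl_cons, List.foldl_nil, List.filter_append]
    by_cases hc : c x = true
    · simp only [hc, if_true, List.filter_cons, List.filter_nil]
      set D := t.foldl (fun nd k => if c k then nd.insert k (V k) else nd)
        (PySem.Dict.empty : PySem.Dict String (List (String × Int))) with hD
      have hadd : PySem.Set.ofList (t.filter c ++ [x]) = PySem.Set.add (PySem.Set.ofList (t.filter c)) x := by
        simp [PySem.Set.ofList, List.foldl_append]
      rw [hadd]
      unfold PySem.Set.add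
      have hkeys : D.keys = PySem.Set.ofList (t.filter c) := by
        have : D.keys = D.items.map (fun p => p.1) := rfl
        rw [this, ih, List.map_map]
        exact List.map_id'' (congrFun rfl) _
      by_cases hm : x ∈ PySem.Set.ofList (t.filter c)
      · have hcont : D.contains x = true := by
          have : x ∈ D.keys := by rw [hkeys]; exact hm
          unfold PySem.Dict.contains
          rcases List.mem_map.mp this with ⟨p, hp, hpx⟩
          exact List.any_eq_true.mpr ⟨p, hp, by simp [hpx]⟩
        have hsc : (PySem.Set.ofList (t.filter c)).contains x = true := by
          simpa [List.contains_iff_mem] using hm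
        rw [PySem.Dict.items_insert_of_contains D (V x) hcont, ih, hsc]
        simp only [if_true, List.map_map]
        apply List.map_congr_left
        intro k _
        by_cases hk : k = x
        · subst hk; simp
        · simp [Function.comp, beq_eq_false_iff_ne.mpr hk]
      · have hcont : D.contains x = false := by
          have hx : x ∉ D.keys := by rw [hkeys]; exact hm
          unfold PySem.Dict.contains
          simp only [List.any_eq_false]
          intro p hp he
          exact hx (List.mem_map.mpr ⟨p, hp, eq_of_beq he⟩)
        have hsc : (PySem.Set.ofList (t.filter c)).contains x = false := by
          simpa [List.contains_iff_mem] using hm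
        rw [PySem.Dict.items_insert_of_not_contains D (V x) hcont, ih, hsc]
        simp
    · simp only [Bool.not_eq_true] at hc
      simp [hc, ih]

-- B's loop, looked up at one outer key: the fold of inner inserts over that key's pairs
theorem pv_group_getD :
    ∀ (l : List (String × String × Int)) (nd0 : PySem.Dict String (PySem.Dict String Int)) (c : String),
      (l.foldl (fun nd p => nd.modify p.1 PySem.Dict.empty (fun inner => inner.insert p.2.1 p.2.2)) nd0).getD c PySem.Dict.empty
      = ((l.filter (fun p => p.1 == c)).map (fun p => p.2)).foldl (fun d q => d.insert q.1 q.2) (nd0.getD c PySem.Dict.empty) := by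
  intro l
  induction l with
  | nil => intro nd0 c; rfl
  | cons p t ih =>
    intro nd0 c
    rw [List.foldl_cons, ih, List.filter_cons]
    by_cases h : p.1 = c
    · simp only [h, beq_self_eq_true, if_true, List.map_cons, List.foldl_cons]
      rw [PySem.Dict.getD_modify]
      simp
    · simp only [beq_eq_false_iff_ne.mpr h, Bool.false_eq_true, if_false]
      rw [PySem.Dict.getD_modify, if_neg (fun hc => h hc.symm)]

-- the filtered view of the input both loops effectively traverse
def pvFiltered (dict_ : List (String × String × Int)) (al : Option (List String)) : List (String × String × Int) :=
  dict_.filter (fun p => pvCond al p.1)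

-- A's mapping_dict is the grouping fold over the filtered input
theorem pv_mapping_eq (dict_ : List (String × String × Int)) (al : Option (List String)) :
    (match al with
     | some allowed =>
         dict_.foldl (fun m p => if allowed.contains p.1 then m.modify p.1 [] (fun l => l ++ [p.2]) else m) PySem.Dict.empty
     | none =>
         dict_.foldl (fun m p => m.modify p.1 [] (fun l => l ++ [p.2])) PySem.Dict.empty)
    = (pvFiltered dict_ al).foldl (fun m p => m.modify p.1 [] (fun l => l ++ [p.2]))
        (PySem.Dict.empty : PySem.Dict String (List (String × Int))) := by
  cases al with
  | none => simp [pvFiltered, pvCond]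
  | some names =>
    simp only [pvFiltered, pvCond]
    exact pv_foldl_filter (fun p => names.contains p.1) _ dict_ _

-- B's outer fold is the unguarded fold over the filtered input
theorem pv_b_fold_eq (dict_ : List (String × String × Int)) (al : Option (List String)) :
    dict_.foldl (fun nd p =>
      if (match al with | some names => !names.contains p.1 | none => false) then nd
      else nd.modify p.1 PySem.Dict.empty (fun inner => inner.insert p.2.1 p.2.2))
      (PySem.Dict.empty : PySem.Dict String (PySem.Dict String Int))
    = (pvFiltered dict_ al).foldl (fun nd p => nd.modify p.1 PySem.Dict.empty (fun inner => inner.insert p.2.1 p.2.2))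
        PySem.Dict.empty := by
  cases al with
  | none => simp [pvFiltered, pvCond]
  | some names =>
    simp only [pvFiltered, pvCond]
    exact pv_foldl_filter_neg (fun p => names.contains p.1) _ dict_ _

-- the two ports agree
theorem pv_main (dict_ : List (String × String × Int)) (al : Option (List String)) :
    convert_tuple_keys_to_nested_dict dict_ al = convert_tuple_keys_to_nested_dict_alt dict_ al := by
  show ((PySem.Set.ofList (dict_.map (fun p => (p.1, p.2.1)))).foldl
      (fun nd kc =>
        if ((match al with
            | some allowed => dict_.foldl (fun m p => if allowed.contains p.1 then m.modify p.1 [] (fun l => l ++ [p.2]) else m) PySem.Dict.empty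
            | none => dict_.foldl (fun m p => m.modify p.1 [] (fun l => l ++ [p.2])) PySem.Dict.empty : PySem.Dict String (List (String × Int))).contains kc.1)
        then nd.insert kc.1 (PySem.Dict.ofList
          ((match al with
            | some allowed => dict_.foldl (fun m p => if allowed.contains p.1 then m.modify p.1 [] (fun l => l ++ [p.2]) else m) PySem.Dict.empty
            | none => dict_.foldl (fun m p => m.modify p.1 [] (fun l => l ++ [p.2])) PySem.Dict.empty : PySem.Dict String (List (String × Int))).getD kc.1 [])).items
        else nd) PySem.Dict.empty).items
    = (dict_.foldl (fun nd p =>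
        if (match al with | some names => !names.contains p.1 | none => false) then nd
        else nd.modify p.1 PySem.Dict.empty (fun inner => inner.insert p.2.1 p.2.2))
        (PySem.Dict.empty : PySem.Dict String (PySem.Dict String Int))).items.map (fun q => (q.1, q.2.items))
  rw [pv_mapping_eq dict_ al, pv_b_fold_eq dict_ al]
  set l := pvFiltered dict_ al with hl
  set M := l.foldl (fun m p => m.modify p.1 [] (fun l => l ++ [p.2]))
    (PySem.Dict.empty : PySem.Dict String (List (String × Int))) with hM
  set B := l.foldl (fun nd p => nd.modify p.1 PySem.Dict.empty (fun inner => inner.insert p.2.1 p.2.2))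
    (PySem.Dict.empty : PySem.Dict String (PySem.Dict String Int)) with hB
  -- B side: keys, nodup, items
  have hkeysB : B.keys = PySem.Set.ofList (l.map (fun p => p.1)) := by
    rw [hB]
    exact PySem.Dict.keys_foldl_modify_key l (fun p => p.1) PySem.Dict.empty
      (fun _ p => fun inner => inner.insert p.2.1 p.2.2) PySem.Dict.empty
  have hnodupB : B.keys.Nodup := by
    rw [hB]
    exact PySem.Dict.nodup_keys_foldl_modify_key l (fun p => p.1) PySem.Dict.empty
      (fun _ p => fun inner => inner.insert p.2.1 p.2.2) PySem.Dict.empty PySem.Dict.nodup_keys_empty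
  have hitemsB : B.items = B.keys.map (fun k => (k, B.getD k PySem.Dict.empty)) :=
    PySem.Dict.items_eq_map_keys B hnodupB PySem.Dict.empty
  -- A side: M's keys and grouped values
  have hkeysM : M.keys = PySem.Set.ofList (l.map (fun p => p.1)) := by
    rw [hM]
    exact PySem.Dict.keys_foldl_modify_key l (fun p => p.1) []
      (fun _ p => fun l' => l' ++ [p.2]) PySem.Dict.empty
  have hgetDM : ∀ k, M.getD k [] = ((l.filter (fun p => p.1 == k)).map (fun p => p.2)) := by
    intro k
    rw [hM, PySem.Dict.getD_foldl_modify_append l PySem.Dict.empty k]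
    simp [PySem.Dict.getD_empty]
  -- turn A's fold over pairs into a fold over first components
  have hfold : ((PySem.Set.ofList (dict_.map (fun p => (p.1, p.2.1)))).foldl
        (fun nd kc => if M.contains kc.1 then nd.insert kc.1 (PySem.Dict.ofList (M.getD kc.1 [])).items else nd)
        PySem.Dict.empty)
      = (((PySem.Set.ofList (dict_.map (fun p => (p.1, p.2.1)))).map (fun kc => kc.1)).foldl
        (fun nd k => if M.contains k then nd.insert k (PySem.Dict.ofList (M.getD k [])).items else nd)
        PySem.Dict.empty) := by
    rw [List.foldl_map]
  rw [hfold]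
  rw [pv_insert_loop_items (fun k => M.contains k) (fun k => (PySem.Dict.ofList (M.getD k [])).items)]
  -- B side rewritten to a map over its key set
  rw [hitemsB, List.map_map, hkeysB]
  -- the two outer key sets agree
  have hcont : ∀ k, (M.contains k) = ((l.map (fun p => p.1)).contains k) := by
    intro k
    have h1 : M.contains k = true ↔ k ∈ M.keys := PySem.Dict.contains_iff_mem_keys M k
    have h2 : (l.map (fun p => p.1)).contains k = true ↔ k ∈ l.map (fun p => p.1) :=
      List.contains_iff_mem
    rw [Bool.eq_iff_iff, h1, h2, hkeysM, PySem.Set.mem_ofList]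
  have hSets : PySem.Set.ofList
        ((((PySem.Set.ofList (dict_.map (fun p => (p.1, p.2.1)))).map (fun kc => kc.1)).filter
          (fun k => M.contains k)))
      = PySem.Set.ofList (l.map (fun p => p.1)) := by
    have hcongr : (((PySem.Set.ofList (dict_.map (fun p => (p.1, p.2.1)))).map (fun kc => kc.1)).filter
          (fun k => M.contains k))
        = (((PySem.Set.ofList (dict_.map (fun p => (p.1, p.2.1)))).map (fun kc => kc.1)).filter
          (pvCond al)) := by
      apply List.filter_congr
      intro k hk
      -- k is a first component of some entry of dict_
      have hkd : k ∈ dict_.map (fun p => p.1) := by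
        rcases List.mem_map.mp hk with ⟨kc, hkc, hkck⟩
        rcases List.mem_map.mp ((PySem.Set.mem_ofList _ kc).mp hkc) with ⟨p, hp, hpkc⟩
        exact List.mem_map.mpr ⟨p, hp, by rw [← hpkc] at hkck; simpa using hkck⟩
      rw [hcont k, Bool.eq_iff_iff]
      constructor
      · intro hc
        have hmem : k ∈ l.map (fun p => p.1) := by
          have := (List.contains_iff_mem (as := l.map (fun p => p.1)) (a := k)).mp hc
          exact this
        rcases List.mem_map.mp hmem with ⟨p, hp, hpk⟩
        have := (List.mem_filter.mp hp).2
        simpa [hpk] using this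
      · intro hc
        rcases List.mem_map.mp hkd with ⟨p, hp, hpk⟩
        have hpl : p ∈ l := List.mem_filter.mpr ⟨hp, by simpa [hpk] using hc⟩
        exact (List.contains_iff_mem (as := l.map (fun p => p.1)) (a := k)).mpr
          (List.mem_map.mpr ⟨p, hpl, hpk⟩)
    rw [hcongr, pv_ofList_filter (pvCond al), pv_ofList_map_ofList (fun kc : String × String => kc.1)]
    have hmm : (dict_.map (fun p => (p.1, p.2.1))).map (fun kc => kc.1) = dict_.map (fun p => p.1) := by
      rw [List.map_map]; rfl
    rw [hmm, ← pv_ofList_filter (pvCond al)]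
    have hfm : (dict_.map (fun p => p.1)).filter (pvCond al) = l.map (fun p => p.1) := by
      rw [List.filter_map]; rfl
    rw [hfm]
  rw [hSets]
  -- pointwise: the two per-key inner dicts agree
  apply List.map_congr_left
  intro k _
  have hBk : B.getD k PySem.Dict.empty
      = ((l.filter (fun p => p.1 == k)).map (fun p => p.2)).foldl (fun d q => d.insert q.1 q.2) PySem.Dict.empty := by
    rw [hB, pv_group_getD l PySem.Dict.empty k, PySem.Dict.getD_empty]
  show (k, (PySem.Dict.ofList (M.getD k [])).items) = (k, (B.getD k PySem.Dict.empty).items)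
  rw [hBk, hgetDM k]
  rfl

-- ===== VERDICT (by name: the statement is the Claim_ definition above) =====
theorem convert_tuple_keys_to_nested_dict_spec : Claim_equal_convert_tuple_keys_to_nested_dict := by
  intro dict_ al _
  exact pv_main dict_ al
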